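-- pv_equiv track=rewrite | github.com/AdrianMuntean/project-Euler | 52_permuted_multiples.py | same_digits_multiple
-- ===== SOURCE A (Python) =====
-- import copy
--
-- def same_digits_multiple(number, digits):
--     digits_copy = copy.deepcopy(digits)
--     for i in map(int, str(number)):
--         if digits_copy.get(i):
--             digits_copy[i] = False
--         else:
--             return False
--
--     return True
-- ===== SOURCE B (Python) =====
-- def same_digits_multiple(number, digits):
--     ds = [int(c) for c in str(number)]
--     return len(set(ds)) == len(ds) and all(digits.get(d) for d in ds)
-- ===== Notes on version B (the rewrite author's own statement) =====
-- stated objective: simpler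
-- what changed: A consumes a deep-copied dict inside one short-circuiting loop (marking each used digit False to catch repeats); B builds the digit list once and replaces the loop by two aggregate tests: a set-length comparison for duplicate digits and an all() over the untouched dict for availability.
import Mathlib
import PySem

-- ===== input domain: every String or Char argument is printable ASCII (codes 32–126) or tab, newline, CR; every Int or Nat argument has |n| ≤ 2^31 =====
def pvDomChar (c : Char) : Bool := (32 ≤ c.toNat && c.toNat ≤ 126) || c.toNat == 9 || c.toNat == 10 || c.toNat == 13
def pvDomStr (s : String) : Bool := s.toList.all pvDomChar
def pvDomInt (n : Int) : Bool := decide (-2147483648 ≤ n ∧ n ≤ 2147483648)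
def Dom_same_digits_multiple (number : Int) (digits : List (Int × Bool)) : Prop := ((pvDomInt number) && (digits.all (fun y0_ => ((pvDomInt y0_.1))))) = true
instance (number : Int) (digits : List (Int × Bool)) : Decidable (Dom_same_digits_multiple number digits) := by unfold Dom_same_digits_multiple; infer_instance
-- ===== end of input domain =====

-- B replaces A's consume-and-mutate loop over a deep-copied dict by two aggregate
-- tests on the digit list (set-length duplicate check + all() availability check); objective: simpler.

-- ===== PORT A =====
-- A's 'for i in map(int, str(number))' loop over the deep-copied dict; int(c) is
-- PySem.Int.ofChars? [c] (none = ValueError, excluded by Pre_, where A's loop has no value).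
def pvALoop : List Char → PySem.Dict Int Bool → Bool
  | [], _ => true
  | c :: rest, d =>
    match PySem.Int.ofChars? [c] with
    | none => false  -- Python raises ValueError here; Pre_ excludes these inputs
    | some i => if d.getD i false then pvALoop rest (d.insert i false) else false

def same_digits_multiple (number : Int) (digits : List (Int × Bool)) : Bool :=
  -- copy.deepcopy(digits) is the identity on the value level
  pvALoop (PySem.Int.toChars number) (PySem.Dict.mk digits)

-- ===== PORT B =====
-- int(c) for a single character; under Pre_ every character of str(number) is a digit,
-- so the default 0 is never taken (Python raises ValueError there, excluded by Pre_).
def pvDigitVal (c : Char) : Int := (PySem.Int.ofChars? [c]).getD 0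

def same_digits_multiple_alt (number : Int) (digits : List (Int × Bool)) : Bool :=
  let ds := (PySem.Int.toChars number).map pvDigitVal
  decide ((PySem.Set.ofList ds).length = ds.length) && ds.all (fun d => (PySem.Dict.mk digits).getD d false)

-- ===== PRECONDITION & SPEC =====
-- Pre_ excludes negative numbers: there str(number) starts with '-' and both A and B
-- raise ValueError at int('-').
def Pre_same_digits_multiple (number : Int) (digits : List (Int × Bool)) : Prop := 0 ≤ number
instance (number : Int) (digits : List (Int × Bool)) : Decidable (Pre_same_digits_multiple number digits) := by unfold Pre_same_digits_multiple; infer_instance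

def pvWitness_same_digits_multiple : Int × (List (Int × Bool)) := (12, [(1, true), (2, true)])

def Spec_same_digits_multiple (number : Int) (digits : List (Int × Bool)) (out : Bool) : Prop := out = same_digits_multiple_alt number digits
instance (number : Int) (digits : List (Int × Bool)) (out : Bool) : Decidable (Spec_same_digits_multiple number digits out) := by unfold Spec_same_digits_multiple; infer_instance

-- ===== CLAIM (what is proved, stated in full; the proofs are below) =====
def Claim_equal_same_digits_multiple : Prop := ∀ (number : Int) (digits : List (Int × Bool)), Dom_same_digits_multiple number digits → Pre_same_digits_multiple number digits → Spec_same_digits_multiple number digits (same_digits_multiple number digits)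

-- ===== LEMMAS AND PROOFS =====

-- single digit characters parse
lemma pv_ofChars_digitChar (r : Nat) (hr : r < 10) :
    (PySem.Int.ofChars? [Nat.digitChar r]).isSome = true := by
  interval_cases r <;> decide

-- every character produced by Nat.toDigitsCore 10 is a digit character (or from the accumulator)
lemma pv_mem_toDigitsCore : ∀ (f n : Nat) (ds : List Char) (c : Char),
    c ∈ Nat.toDigitsCore 10 f n ds → c ∈ ds ∨ ∃ r, r < 10 ∧ c = Nat.digitChar r := by
  intro f
  induction f with
  | zero => intro n ds c h; exact Or.inl h
  | succ f ih =>
    intro n ds c h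
    simp only [Nat.toDigitsCore] at h
    by_cases h10 : n / 10 = 0
    · rw [if_pos h10] at h
      rcases List.mem_cons.mp h with h | h
      · exact Or.inr ⟨n % 10, Nat.mod_lt _ (by norm_num), h⟩
      · exact Or.inl h
    · rw [if_neg h10] at h
      rcases ih _ _ _ h with h | h
      · rcases List.mem_cons.mp h with h | h
        · exact Or.inr ⟨n % 10, Nat.mod_lt _ (by norm_num), h⟩
        · exact Or.inl h
      · exact Or.inr h

lemma pv_chars_parse (n : Int) (hn : 0 ≤ n) :
    ∀ c ∈ PySem.Int.toChars n, (PySem.Int.ofChars? [c]).isSome = true := by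
  intro c hc
  simp only [PySem.Int.toChars, if_neg (not_lt.mpr hn)] at hc
  rcases pv_mem_toDigitsCore _ _ _ _ hc with h | ⟨r, hr, rfl⟩
  · simp at h
  · exact pv_ofChars_digitChar r hr

-- set-length comparison detects duplicates
lemma pv_ofList_length_iff_nodup (xs : List Int) :
    (PySem.Set.ofList xs).length = xs.length ↔ xs.Nodup := by
  have hperm : (PySem.Set.ofList xs).Perm xs.dedup := by
    refine (List.perm_ext_iff_of_nodup (PySem.Set.nodup_ofList xs) xs.nodup_dedup).mpr ?_
    intro a; rw [PySem.Set.mem_ofList, List.mem_dedup]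
  rw [hperm.length_eq]
  constructor
  · intro h
    rw [← List.dedup_eq_self]
    exact xs.dedup_sublist.eq_of_length h
  · intro h; rw [List.dedup_eq_self.mpr h]

-- A's loop computes exactly B's two aggregate tests (Nodup form), for any dict state
lemma pv_aLoop_eq (cs : List Char) (h : ∀ c ∈ cs, (PySem.Int.ofChars? [c]).isSome = true)
    (d : PySem.Dict Int Bool) :
    pvALoop cs d
      = (decide (cs.map pvDigitVal).Nodup && (cs.map pvDigitVal).all (fun j => d.getD j false)) := by
  induction cs generalizing d with
  | nil => simp [pvALoop]
  | cons c rest ih =>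
    obtain ⟨i, hi⟩ := Option.isSome_iff_exists.mp (h c (by simp))
    have hv : pvDigitVal c = i := by simp [pvDigitVal, hi]
    have hrest : ∀ c' ∈ rest, (PySem.Int.ofChars? [c']).isSome = true :=
      fun c' hc' => h c' (by simp [hc'])
    simp only [pvALoop, hi, List.map_cons]
    rw [ih hrest, Bool.eq_iff_iff]
    by_cases hgd : d.getD i false = true
    · rw [if_pos hgd]
      simp only [Bool.and_eq_true, decide_eq_true_eq, List.all_eq_true,
        List.nodup_cons, List.all_cons, PySem.Dict.getD_insert, hv, hgd, List.mem_map]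
      constructor
      · rintro ⟨hnd, hall⟩
        refine ⟨⟨?_, hnd⟩, by simp, ?_⟩
        · intro hmem
          have := hall i hmem
          simp at this
        · intro j hj
          have := hall j hj
          by_cases hji : j = i
          · simp [hji] at this
          · simpa [hji] using this
      · rintro ⟨⟨hni, hnd⟩, _, hall⟩
        refine ⟨hnd, ?_⟩
        intro j hj
        have hji : ¬ j = i := fun he => hni (he ▸ hj)
        simpa [hji] using hall j hj
    · have hgd' : d.getD i false = false := by simpa using hgd
      simp [hgd', hv]

-- ===== VERDICT (by name: the statement is the Claim_ definition above) =====
theorem same_digits_multiple_spec : Claim_equal_same_digits_multiple := by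
  intro number digits _ hpre
  unfold Spec_same_digits_multiple same_digits_multiple same_digits_multiple_alt
  rw [pv_aLoop_eq _ (pv_chars_parse number hpre)]
  rw [decide_eq_decide.mpr (pv_ofList_length_iff_nodup _).symm]
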